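-- pv_equiv track=rewrite | github.com/isaacwasserman/thesis_implementation | test.py | get_regions_containing_pixel
-- ===== SOURCE A (Python) =====
-- def get_window_indices(image_size, window_size):
--     indices = []
--     for x in range(image_size - window_size + 1):
--         for y in range(image_size - window_size + 1):
--             indices.append((x, y))
--     return indices
--
-- def get_region_indices(image_size, window_size):
--     indices = []
--     for x in range(window_size):
--         for y in range(window_size):
--             indices.append((x, y))
--     return indices
--
-- def get_regions_containing_pixel(pixel_index, image_size, window_size):
--     window_indices = get_window_indices(image_size, window_size)
--     region_indices = get_region_indices(window_size, window_size)
--     regions = []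
--     for window_index in window_indices:
--         window_x, window_y = window_index
--         for region_index in region_indices:
--             region_x, region_y = region_index
--             x = window_x * window_size + region_x
--             y = window_y * window_size + region_y
--             if (x, y) == pixel_index:
--                 regions.append((window_x, window_y))
--     return regions
-- ===== SOURCE B (Python) =====
-- def get_regions_containing_pixel(pixel_index, image_size, window_size):
--     # Windows tile the image in disjoint window_size x window_size blocks,
--     # so the (unique) containing window is found by floor division.
--     if window_size <= 0:
--         return []
--     px, py = pixel_index
--     qx = px // window_size
--     qy = py // window_size
--     if 0 <= qx <= image_size - window_size and 0 <= qy <= image_size - window_size: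
--         return [(qx, qy)]
--     return []
-- ===== Notes on version B (the rewrite author's own statement) =====
-- stated objective: faster
-- what changed: Replaces the quadruple loop over all windows and all in-window offsets with a direct floor-division computation of the unique block window containing the pixel, plus a bounds check.
import Mathlib
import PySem

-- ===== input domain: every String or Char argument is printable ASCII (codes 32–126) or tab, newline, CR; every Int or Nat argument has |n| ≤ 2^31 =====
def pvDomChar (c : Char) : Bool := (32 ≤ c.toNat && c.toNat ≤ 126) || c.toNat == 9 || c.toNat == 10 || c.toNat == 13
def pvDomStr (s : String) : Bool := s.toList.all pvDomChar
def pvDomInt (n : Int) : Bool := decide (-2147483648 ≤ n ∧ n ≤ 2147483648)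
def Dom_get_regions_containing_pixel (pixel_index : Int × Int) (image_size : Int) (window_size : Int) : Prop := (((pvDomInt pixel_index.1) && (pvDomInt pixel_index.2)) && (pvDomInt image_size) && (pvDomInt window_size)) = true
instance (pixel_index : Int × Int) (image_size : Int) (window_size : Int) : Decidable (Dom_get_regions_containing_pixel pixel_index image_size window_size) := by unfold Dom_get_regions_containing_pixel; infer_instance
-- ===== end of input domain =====

-- B replaces A's quadruple loop over every window and every in-window offset by an O(1)
-- floor-division computation of the unique containing block window (objective: faster).

-- ===== PORT A =====
def pv_get_window_indices (image_size : Int) (window_size : Int) : List (Int × Int) :=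
  (PySem.List.pyRange 0 (image_size - window_size + 1) 1).foldl (fun indices x =>
    (PySem.List.pyRange 0 (image_size - window_size + 1) 1).foldl (fun indices y =>
      indices ++ [(x, y)]) indices) []

def pv_get_region_indices (image_size : Int) (window_size : Int) : List (Int × Int) :=
  (PySem.List.pyRange 0 window_size 1).foldl (fun indices x =>
    (PySem.List.pyRange 0 window_size 1).foldl (fun indices y =>
      indices ++ [(x, y)]) indices) []

def get_regions_containing_pixel (pixel_index : Int × Int) (image_size : Int) (window_size : Int) : List (Int × Int) :=
  let window_indices := pv_get_window_indices image_size window_size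
  let region_indices := pv_get_region_indices window_size window_size
  window_indices.foldl (fun regions window_index =>
    region_indices.foldl (fun regions region_index =>
      let x := window_index.1 * window_size + region_index.1
      let y := window_index.2 * window_size + region_index.2
      if (x, y) = pixel_index then regions ++ [(window_index.1, window_index.2)] else regions)
      regions) []

-- ===== PORT B =====
def get_regions_containing_pixel_alt (pixel_index : Int × Int) (image_size : Int) (window_size : Int) : List (Int × Int) :=
  if window_size ≤ 0 then []
  else
    let qx := PySem.Int.floordiv pixel_index.1 window_size
    let qy := PySem.Int.floordiv pixel_index.2 window_size
    if 0 ≤ qx ∧ qx ≤ image_size - window_size ∧ 0 ≤ qy ∧ qy ≤ image_size - window_size then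
      [(qx, qy)]
    else []

-- ===== PRECONDITION & SPEC =====
def Spec_get_regions_containing_pixel (pixel_index : Int × Int) (image_size : Int) (window_size : Int) (out : List (Int × Int)) : Prop := out = get_regions_containing_pixel_alt pixel_index image_size window_size
instance (pixel_index : Int × Int) (image_size : Int) (window_size : Int) (out : List (Int × Int)) : Decidable (Spec_get_regions_containing_pixel pixel_index image_size window_size out) := by unfold Spec_get_regions_containing_pixel; infer_instance

-- ===== CLAIM (what is proved, stated in full; the proofs are below) =====
def Claim_equal_get_regions_containing_pixel : Prop := ∀ (pixel_index : Int × Int) (image_size : Int) (window_size : Int), Dom_get_regions_containing_pixel pixel_index image_size window_size → Spec_get_regions_containing_pixel pixel_index image_size window_size (get_regions_containing_pixel pixel_index image_size window_size)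

-- ===== LEMMAS AND PROOFS =====

-- A's nested appending double loop builds the cartesian product of the range with itself.
theorem pv_pairs (L : List Int) :
    List.foldl (fun acc x => List.foldl (fun acc y => acc ++ [(x, y)]) acc L)
      ([] : List (Int × Int)) L = L ×ˢ L := by
  have h : (fun (acc : List (Int × Int)) (x : Int) =>
        List.foldl (fun acc y => acc ++ [(x, y)]) acc L)
      = fun acc x => acc ++ L.map (fun y => (x, y)) := by
    funext acc x
    exact PySem.List.foldl_append_singleton_eq_map _ L acc
  rw [h, PySem.List.foldl_append_eq_flatMap]
  rfl

theorem pv_window_indices_eq (n w : Int) :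
    pv_get_window_indices n w
      = PySem.List.pyRange 0 (n - w + 1) 1 ×ˢ PySem.List.pyRange 0 (n - w + 1) 1 := by
  unfold pv_get_window_indices
  exact pv_pairs _

theorem pv_region_indices_eq (n w : Int) :
    pv_get_region_indices n w
      = PySem.List.pyRange 0 w 1 ×ˢ PySem.List.pyRange 0 w 1 := by
  unfold pv_get_region_indices
  exact pv_pairs _

-- filtering a duplicate-free list for one value yields that value (once) or nothing
theorem pv_filter_eq_singleton {l : List (Int × Int)} (hl : l.Nodup) (a : Int × Int) :
    l.filter (fun x => decide (x = a)) = if a ∈ l then [a] else [] := by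
  induction l with
  | nil => simp
  | cons b t ih =>
    simp only [List.nodup_cons] at hl
    by_cases hba : b = a
    · subst hba
      simp [ih hl.2, hl.1]
    · have hmem : a ∈ b :: t ↔ a ∈ t := by
        constructor
        · intro h
          rcases List.mem_cons.mp h with h | h
          · exact absurd h.symm hba
          · exact h
        · exact List.mem_cons_of_mem b
      rw [List.filter_cons_of_neg (by simp [hba]), ih hl.2]
      simp [hmem]

theorem pv_flatMap_ite_eq_filter {α : Type} (q : α → Prop) [DecidablePred q] (l : List α) :
    l.flatMap (fun x => if q x then [x] else []) = l.filter (fun x => decide (q x)) := by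
  induction l with
  | nil => rfl
  | cons b t ih => by_cases hb : q b <;> simp [hb, ih]

-- the containing block window is the floor-division quotient
theorem pv_block (a w q : Int) (hw : 0 < w) :
    (0 ≤ a - q * w ∧ a - q * w < w) ↔ q = PySem.Int.floordiv a w := by
  rw [eq_comm, PySem.Int.floordiv_eq_iff_of_pos hw]
  constructor <;> rintro ⟨h1, h2⟩ <;> constructor <;> nlinarith

-- ===== VERDICT (by name: the statement is the Claim_ definition above) =====
theorem get_regions_containing_pixel_spec : Claim_equal_get_regions_containing_pixel := by
  intro p n w _
  show get_regions_containing_pixel p n w = get_regions_containing_pixel_alt p n w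
  unfold get_regions_containing_pixel get_regions_containing_pixel_alt
  rw [pv_window_indices_eq, pv_region_indices_eq]
  dsimp only
  by_cases hw : w ≤ 0
  · -- region_indices is empty: every inner loop is a no-op, both sides are []
    have hRwnil : PySem.List.pyRange 0 w 1 = [] := PySem.List.pyRange_one_eq_nil hw
    simp [hRwnil, if_pos hw, SProd.sprod, List.product]
  · have hw0 : 0 < w := by omega
    rw [if_neg hw]
    set R1 := PySem.List.pyRange 0 (n - w + 1) 1 with hR1
    set Rw := PySem.List.pyRange 0 w 1 with hRw
    -- rewrite A's double loop into a flatMap of per-window filters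
    have hinner : (fun (regions : List (Int × Int)) (wi : Int × Int) =>
          List.foldl (fun regions ri =>
            if (wi.1 * w + ri.1, wi.2 * w + ri.2) = p then regions ++ [(wi.1, wi.2)] else regions)
            regions (Rw ×ˢ Rw))
        = fun regions wi => regions ++
            ((Rw ×ˢ Rw).filter
              (fun ri => decide ((wi.1 * w + ri.1, wi.2 * w + ri.2) = p))).map
              (fun _ => (wi.1, wi.2)) := by
      funext regions wi
      have := PySem.List.foldl_append_if
        (fun ri : Int × Int => decide ((wi.1 * w + ri.1, wi.2 * w + ri.2) = p))
        (fun _ => (wi.1, wi.2)) (Rw ×ˢ Rw) regions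
      simpa using this
    rw [hinner, PySem.List.foldl_append_eq_flatMap, List.nil_append]
    -- per window the filter keeps at most the unique matching offset
    have hRwnd : (Rw ×ˢ Rw).Nodup :=
      List.Nodup.product (PySem.List.nodup_pyRange_one 0 w) (PySem.List.nodup_pyRange_one 0 w)
    have hbody : (fun (wi : Int × Int) =>
          ((Rw ×ˢ Rw).filter
            (fun ri => decide ((wi.1 * w + ri.1, wi.2 * w + ri.2) = p))).map
            (fun _ => (wi.1, wi.2)))
        = fun wi => if (p.1 - wi.1 * w, p.2 - wi.2 * w) ∈ Rw ×ˢ Rw then [wi] else [] := by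
      funext wi
      have hcong : (Rw ×ˢ Rw).filter
            (fun ri => decide ((wi.1 * w + ri.1, wi.2 * w + ri.2) = p))
          = (Rw ×ˢ Rw).filter (fun ri => decide (ri = (p.1 - wi.1 * w, p.2 - wi.2 * w))) := by
        apply List.filter_congr
        intro ri _
        simp only [decide_eq_decide, Prod.ext_iff]
        omega
      rw [hcong, pv_filter_eq_singleton hRwnd]
      split_ifs <;> simp
    rw [hbody, pv_flatMap_ite_eq_filter]
    -- the matching-window condition pins the window to the floordiv pair
    have hcong2 : (R1 ×ˢ R1).filter
          (fun wi => decide ((p.1 - wi.1 * w, p.2 - wi.2 * w) ∈ Rw ×ˢ Rw))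
        = (R1 ×ˢ R1).filter
          (fun wi => decide (wi = (PySem.Int.floordiv p.1 w, PySem.Int.floordiv p.2 w))) := by
      apply List.filter_congr
      intro wi _
      simp only [decide_eq_decide, List.mem_product, hRw, PySem.List.mem_pyRange_one,
        Prod.ext_iff]
      rw [pv_block p.1 w wi.1 hw0, pv_block p.2 w wi.2 hw0]
    have hR1nd : (R1 ×ˢ R1).Nodup :=
      List.Nodup.product (PySem.List.nodup_pyRange_one 0 (n - w + 1))
        (PySem.List.nodup_pyRange_one 0 (n - w + 1))
    rw [hcong2, pv_filter_eq_singleton hR1nd]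
    have hmem : (PySem.Int.floordiv p.1 w, PySem.Int.floordiv p.2 w) ∈ R1 ×ˢ R1
        ↔ (0 ≤ PySem.Int.floordiv p.1 w ∧ PySem.Int.floordiv p.1 w ≤ n - w ∧
           0 ≤ PySem.Int.floordiv p.2 w ∧ PySem.Int.floordiv p.2 w ≤ n - w) := by
      simp only [List.mem_product, hR1, PySem.List.mem_pyRange_one]
      omega
    split_ifs with h1 h2 h2
    · rfl
    · exact absurd (hmem.mp h1) h2
    · exact absurd (hmem.mpr h2) h1
    · rfl
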